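-- pv_equiv track=rewrite | github.com/elcelsius/tradutor_llm | tradutor/anti_hallucination.py | detect_repetition_anomaly
-- ===== SOURCE A (Python) =====
-- def detect_repetition_anomaly(text: str) -> bool:
--     lines = [ln.strip() for ln in text.splitlines() if ln.strip()]
--     counts = {}
--     for ln in lines:
--         counts[ln] = counts.get(ln, 0) + 1
--     if any(c >= 3 for c in counts.values()):
--         return True
--     words = text.split()
--     wc = {}
--     for w in words:
--         wc[w] = wc.get(w, 0) + 1
--     if words and max(wc.values()) >= 10:
--         return True
--     return False
-- ===== SOURCE B (Python) =====
-- def _has_run(xs, k):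
--     # xs sorted: equal elements are adjacent, so a value occurs >= k times
--     # iff some consecutive run has length >= k.
--     run = 0
--     prev = None
--     for x in xs:
--         run = run + 1 if x == prev else 1
--         if run >= k:
--             return True
--         prev = x
--     return False
--
--
-- def detect_repetition_anomaly(text: str) -> bool:
--     lines = sorted(ln.strip() for ln in text.splitlines() if ln.strip())
--     if _has_run(lines, 3):
--         return True
--     return _has_run(sorted(text.split()), 10)
-- ===== Notes on version B (the rewrite author's own statement) =====
-- stated objective: alternative
-- what changed: Replaces the two hash-counter builds and the value scan/max with sort-then-scan: strip/filter the lines, sort them, and detect a consecutive run of length >= 3 in one early-exit pass; if none, sort the whitespace-split words and detect a consecutive run of length >= 10, since sorting makes equal elements adjacent so run length equals occurrence count.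
import Mathlib
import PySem

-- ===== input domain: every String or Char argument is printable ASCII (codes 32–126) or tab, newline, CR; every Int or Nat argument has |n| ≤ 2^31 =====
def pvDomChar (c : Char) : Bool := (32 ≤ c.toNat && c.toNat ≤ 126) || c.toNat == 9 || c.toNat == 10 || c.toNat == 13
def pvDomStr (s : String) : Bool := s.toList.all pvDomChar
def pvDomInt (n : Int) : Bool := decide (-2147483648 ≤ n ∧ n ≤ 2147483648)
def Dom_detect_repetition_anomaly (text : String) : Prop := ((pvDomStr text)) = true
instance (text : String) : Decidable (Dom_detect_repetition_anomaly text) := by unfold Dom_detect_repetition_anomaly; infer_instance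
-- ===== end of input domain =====

-- B replaces A's two hash-counter passes by sort-then-scan for a consecutive run (length ≥ 3 for lines, ≥ 10 for words); return values proved equal on all inputs.

-- ===== PORT A =====
def detect_repetition_anomaly (text : String) : Bool :=
  let lines := ((PySem.Str.splitlines text).filter (fun ln => PySem.Str.strip ln ≠ "")).map PySem.Str.strip
  let counts := lines.foldl (fun d ln => d.insert ln (d.getD ln 0 + 1)) (PySem.Dict.empty : PySem.Dict String Int)
  if counts.values.any (fun c => 3 ≤ c) then true
  else
    let words := PySem.Str.split₀ text
    let wc := words.foldl (fun d w => d.insert w (d.getD w 0 + 1)) (PySem.Dict.empty : PySem.Dict String Int)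
    if words ≠ [] then
      match PySem.List.max? wc.values (fun y => y) with
      | some m => decide (10 ≤ m)
      | none => false
    else false

-- ===== PORT B =====
-- Source B's _has_run loop: prev starts as None, run as 0, early return on run >= k
def hasRunLoop (k : Nat) : Option String → Nat → List String → Bool
  | _, _, [] => false
  | prev, run, x :: xs =>
    let r := if some x = prev then run + 1 else 1
    if k ≤ r then true else hasRunLoop k (some x) r xs

def hasRun (xs : List String) (k : Nat) : Bool := hasRunLoop k none 0 xs

def detect_repetition_anomaly_alt (text : String) : Bool :=
  let lines := PySem.List.sorted (((PySem.Str.splitlines text).filter (fun ln => PySem.Str.strip ln ≠ "")).map PySem.Str.strip) (fun x => x) false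
  if hasRun lines 3 then true
  else hasRun (PySem.List.sorted (PySem.Str.split₀ text) (fun x => x) false) 10

-- ===== PRECONDITION & SPEC =====
def Spec_detect_repetition_anomaly (text : String) (out : Bool) : Prop := out = detect_repetition_anomaly_alt text
instance (text : String) (out : Bool) : Decidable (Spec_detect_repetition_anomaly text out) := by unfold Spec_detect_repetition_anomaly; infer_instance

-- ===== CLAIM (what is proved, stated in full; the proofs are below) =====
def Claim_equal_detect_repetition_anomaly : Prop := ∀ (text : String), Dom_detect_repetition_anomaly text → Spec_detect_repetition_anomaly text (detect_repetition_anomaly text)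

-- ===== LEMMAS AND PROOFS =====

-- A's counter over xs has some value ≥ 3 iff some element of xs occurs ≥ 3 times.
theorem counter_any_3 (xs : List String) :
    ((xs.foldl (fun d ln => d.insert ln (d.getD ln 0 + 1)) (PySem.Dict.empty : PySem.Dict String Int)).values.any
        (fun c => 3 ≤ c))
      = xs.any (fun x => 3 ≤ PySem.List.count xs x) := by
  rw [PySem.Dict.foldl_insert_getD_add_one_eq_counter,
    PySem.Dict.values_eq_map_keys _ (PySem.Dict.nodup_keys_counter xs) 0,
    PySem.Dict.keys_counter]
  rw [Bool.eq_iff_iff]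
  simp only [List.any_map, Function.comp_def, PySem.Dict.getD_counter, List.any_eq_true,
    PySem.Set.mem_ofList, decide_eq_true_eq, PySem.List.count_eq]
  constructor
  · rintro ⟨k, hk, hck⟩; exact ⟨k, hk, by exact_mod_cast hck⟩
  · rintro ⟨k, hk, hck⟩; exact ⟨k, hk, by exact_mod_cast hck⟩

-- the max of A's word counter is ≥ 10 iff some word occurs ≥ 10 times (nonempty word list).
theorem counter_max_10 (xs : List String) (hne : xs ≠ []) :
    (match PySem.List.max? (xs.foldl (fun d w => d.insert w (d.getD w 0 + 1)) (PySem.Dict.empty : PySem.Dict String Int)).values (fun y => y) with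
      | some m => decide ((10:Int) ≤ m)
      | none => false)
      = xs.any (fun x => 10 ≤ PySem.List.count xs x) := by
  rw [PySem.Dict.foldl_insert_getD_add_one_eq_counter,
    PySem.Dict.values_eq_map_keys _ (PySem.Dict.nodup_keys_counter xs) 0,
    PySem.Dict.keys_counter]
  have hset : PySem.Set.ofList xs ≠ [] := by
    intro h
    rcases List.exists_mem_of_ne_nil xs hne with ⟨x, hx⟩
    have : x ∈ PySem.Set.ofList xs := (PySem.Set.mem_ofList _ _).2 hx
    simp [h] at this
  rcases hm : PySem.List.max? ((PySem.Set.ofList xs).map fun k => (PySem.Dict.counter xs).getD k 0) (fun y => y) with _ | m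
  · exact absurd (List.map_eq_nil_iff.mp ((PySem.List.max?_eq_none_iff _ _).1 hm)) hset
  · have hmem := PySem.List.max?_mem hm
    have hmax := PySem.List.max?_isMax hm
    simp only [List.mem_map] at hmem
    rcases hmem with ⟨k, hk, hkv⟩
    rw [Bool.eq_iff_iff]
    simp only [List.any_eq_true, decide_eq_true_eq, PySem.List.count_eq]
    constructor
    · intro hle
      refine ⟨k, (PySem.Set.mem_ofList _ _).1 hk, ?_⟩
      have : (10:Int) ≤ (PySem.Dict.counter xs).getD k 0 := by rw [hkv]; exact hle
      rw [PySem.Dict.getD_counter] at this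
      exact_mod_cast this
    · rintro ⟨x, hx, hcx⟩
      have := hmax ((PySem.Dict.counter xs).getD x 0)
        (List.mem_map.2 ⟨x, (PySem.Set.mem_ofList _ _).2 hx, rfl⟩)
      rw [PySem.Dict.getD_counter] at this
      have h10 : (10:Int) ≤ (List.count x xs : Int) := by exact_mod_cast hcx
      exact le_trans h10 this


-- B's run loop on a sorted tail ys (previous element prev, current run < k) fires iff
-- prev's occurrences in ys extend the run to k, or some other element occurs ≥ k times in ys.
theorem hasRunLoop_spec (k : Nat) (prev : String) (run : Nat) (hrun : run < k)
    (ys : List String) (hs : (prev :: ys).Pairwise (· ≤ ·)) :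
    hasRunLoop k (some prev) run ys = true ↔
      (k ≤ run + ys.count prev ∨ ∃ x ∈ ys, x ≠ prev ∧ k ≤ ys.count x) := by
  induction ys generalizing prev run with
  | nil => simp [hasRunLoop]; omega
  | cons x ys ih =>
    rcases List.pairwise_cons.1 hs with ⟨hle, hs'⟩
    have hpx : prev ≤ x := hle x (List.mem_cons_self ..)
    by_cases hxp : x = prev
    · subst hxp
      have hrew : hasRunLoop k (some x) run (x :: ys) =
          if k ≤ run + 1 then true else hasRunLoop k (some x) (run + 1) ys := by
        simp [hasRunLoop]
      rw [hrew]
      split_ifs with hk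
      · simp only [List.count_cons_self, true_iff]
        left; omega
      · rw [ih x (run + 1) (by omega) hs']
        constructor
        · rintro (h | ⟨y, hy, hne, hcy⟩)
          · left; rw [List.count_cons_self]; omega
          · refine Or.inr ⟨y, List.mem_cons_of_mem _ hy, hne, ?_⟩
            rw [List.count_cons_of_ne (Ne.symm hne)]; exact hcy
        · rintro (h | ⟨y, hy, hne, hcy⟩)
          · left; rw [List.count_cons_self] at h; omega
          · rcases List.mem_cons.1 hy with h1 | h1
            · exact absurd h1 hne
            · refine Or.inr ⟨y, h1, hne, ?_⟩
              rwa [List.count_cons_of_ne (Ne.symm hne)] at hcy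
    · have hprevys : prev ∉ ys :=
        fun h1 => hxp (le_antisymm ((List.pairwise_cons.1 hs').1 prev h1) hpx)
      have hcount0 : ys.count prev = 0 := List.count_eq_zero.2 hprevys
      have hcount0' : (x :: ys).count prev = 0 := by
        rw [List.count_cons_of_ne hxp]; exact hcount0
      have hrew : hasRunLoop k (some prev) run (x :: ys) =
          if k ≤ 1 then true else hasRunLoop k (some x) 1 ys := by
        simp [hasRunLoop, hxp]
      rw [hrew]
      split_ifs with hk1
      · simp only [true_iff]
        refine Or.inr ⟨x, List.mem_cons_self .., hxp, ?_⟩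
        rw [List.count_cons_self]; omega
      · rw [ih x 1 (by omega) hs']
        constructor
        · rintro (h | ⟨y, hy, hne, hcy⟩)
          · refine Or.inr ⟨x, List.mem_cons_self .., hxp, ?_⟩
            rw [List.count_cons_self]; omega
          · by_cases hyx : y = x
            · subst hyx
              refine Or.inr ⟨y, List.mem_cons_self .., hxp, ?_⟩
              rw [List.count_cons_self]; omega
            · refine Or.inr ⟨y, List.mem_cons_of_mem _ hy, fun h' => hprevys (h' ▸ hy), ?_⟩
              rw [List.count_cons_of_ne (Ne.symm hyx)]; exact hcy
        · rintro (h | ⟨y, hy, hne, hcy⟩)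
          · rw [hcount0'] at h; omega
          · rcases List.mem_cons.1 hy with h1 | h1
            · subst h1
              rw [List.count_cons_self] at hcy
              left; omega
            · by_cases hyx : y = x
              · subst hyx
                rw [List.count_cons_self] at hcy
                left; omega
              · refine Or.inr ⟨y, h1, hyx, ?_⟩
                rwa [List.count_cons_of_ne (Ne.symm hyx)] at hcy

-- on a sorted list, the run scan detects exactly 'some element occurs ≥ k times' (k ≥ 2).
theorem hasRun_sorted (k : Nat) (hk : 2 ≤ k) (ys : List String)
    (hs : ys.Pairwise (· ≤ ·)) :
    hasRun ys k = true ↔ ∃ x ∈ ys, k ≤ ys.count x := by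
  cases ys with
  | nil => simp [hasRun, hasRunLoop]
  | cons x ys =>
    have h1 : hasRun (x :: ys) k = hasRunLoop k (some x) 1 ys := by
      simp [hasRun, hasRunLoop, show ¬ k ≤ 1 by omega]
    rw [h1, hasRunLoop_spec k x 1 (by omega) ys hs]
    constructor
    · rintro (h | ⟨y, hy, hne, hcy⟩)
      · exact ⟨x, List.mem_cons_self .., by rw [List.count_cons_self]; omega⟩
      · refine ⟨y, List.mem_cons_of_mem _ hy, ?_⟩
        rw [List.count_cons_of_ne (Ne.symm hne)]; exact hcy
    · rintro ⟨y, hy, hcy⟩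
      rcases List.mem_cons.1 hy with h1 | h1
      · subst h1; rw [List.count_cons_self] at hcy; left; omega
      · by_cases hyx : y = x
        · subst hyx; rw [List.count_cons_self] at hcy; left; omega
        · refine Or.inr ⟨y, h1, hyx, ?_⟩
          rwa [List.count_cons_of_ne (Ne.symm hyx)] at hcy

-- transfer: run scan on sorted xs = 'some element of xs occurs ≥ k times in xs'.
theorem hasRun_sorted_eq_any (k : Nat) (hk : 2 ≤ k) (xs : List String) :
    hasRun (PySem.List.sorted xs (fun x => x) false) k
      = xs.any (fun x => k ≤ PySem.List.count xs x) := by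
  have hperm : (PySem.List.sorted xs (fun x => x) false).Perm xs := PySem.List.sorted_perm xs _ _
  rw [Bool.eq_iff_iff,
    hasRun_sorted k hk _ (by simpa using PySem.List.sorted_pairwise xs (fun x => x))]
  simp only [List.any_eq_true, decide_eq_true_eq, PySem.List.count_eq]
  constructor
  · rintro ⟨x, hx, hcx⟩
    refine ⟨x, hperm.mem_iff.1 hx, ?_⟩
    rw [← hperm.count_eq]; exact hcx
  · rintro ⟨x, hx, hcx⟩
    refine ⟨x, hperm.mem_iff.2 hx, ?_⟩
    rw [hperm.count_eq]; exact hcx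

-- ===== VERDICT (by name: the statement is the Claim_ definition above) =====
theorem detect_repetition_anomaly_spec : Claim_equal_detect_repetition_anomaly := by
  intro text _
  unfold Spec_detect_repetition_anomaly
  simp only [detect_repetition_anomaly, detect_repetition_anomaly_alt]
  rw [counter_any_3, ← hasRun_sorted_eq_any 3 (by omega)]
  cases hC : hasRun (PySem.List.sorted (((PySem.Str.splitlines text).filter (fun ln => PySem.Str.strip ln ≠ "")).map PySem.Str.strip) (fun x => x) false) 3
  · simp only [Bool.false_eq_true, if_false]
    by_cases hw : PySem.Str.split₀ text = []
    · have hz : PySem.List.sorted (PySem.Str.split₀ text) (fun x => x) false = [] :=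
        (PySem.List.sorted_eq_nil_iff _ _ _).2 hw
      rw [if_neg (fun h => h hw), hz]
      rfl
    · rw [if_pos hw, counter_max_10 _ hw, ← hasRun_sorted_eq_any 10 (by omega)]
  · simp
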